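-- pv_equiv track=rewrite | github.com/gks3075/baekjoon | 프로그래머스/unrated/181874. A 강조하기/A 강조하기.py | solution
-- ===== SOURCE A (Python) =====
-- def solution(myString):
--     answer = ''
--     for x in myString:
--         if x == 'a' or x == 'A':
--             answer += 'A'
--         elif x.isupper():
--             answer += x.lower()
--         else:
--             answer += x
--     return answer
-- ===== SOURCE B (Python) =====
-- def solution(myString):
--     return myString.lower().replace('a', 'A')
-- ===== Notes on version B (the rewrite author's own statement) =====
-- stated objective: faster
-- what changed: Replaces the branchy per-character accumulator loop (quadratic string concatenation) with two C-level library passes: lowercase the whole string, then replace every occurrence of the letter a with its uppercase form.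
import Mathlib
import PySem

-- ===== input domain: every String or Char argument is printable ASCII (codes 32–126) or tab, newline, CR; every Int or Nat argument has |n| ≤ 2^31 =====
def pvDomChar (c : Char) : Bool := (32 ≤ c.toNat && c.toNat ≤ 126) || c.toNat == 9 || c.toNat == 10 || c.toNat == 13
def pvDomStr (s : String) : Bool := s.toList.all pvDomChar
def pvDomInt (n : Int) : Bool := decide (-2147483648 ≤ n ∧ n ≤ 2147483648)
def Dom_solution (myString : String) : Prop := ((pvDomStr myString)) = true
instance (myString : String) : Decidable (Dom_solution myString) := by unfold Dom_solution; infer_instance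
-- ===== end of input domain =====

-- B lowercases the whole string and then replaces 'a' with 'A' (two library passes)
-- instead of A's single branchy character-by-character accumulator loop.

-- ===== PORT A =====
def solution (myString : String) : String :=
  String.ofList (myString.toList.foldl
    (fun answer x =>
      if x = 'a' ∨ x = 'A' then answer ++ ['A']
      else if PySem.Chars.isupper x then answer ++ [PySem.Chars.lowerChar x]
      else answer ++ [x]) [])

-- ===== PORT B =====
def solution_alt (myString : String) : String :=
  PySem.Str.replace (PySem.Str.lower myString) "a" "A"

-- ===== PRECONDITION & SPEC =====
def Spec_solution (myString : String) (out : String) : Prop := out = solution_alt myString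
instance (myString : String) (out : String) : Decidable (Spec_solution myString out) := by unfold Spec_solution; infer_instance

-- ===== CLAIM (what is proved, stated in full; the proofs are below) =====
def Claim_equal_solution : Prop := ∀ (myString : String), Dom_solution myString → Spec_solution myString (solution myString)

-- ===== LEMMAS AND PROOFS =====

-- A's per-character branch, as a function.
def pvStepA (x : Char) : Char :=
  if x = 'a' ∨ x = 'A' then 'A'
  else if PySem.Chars.isupper x then PySem.Chars.lowerChar x
  else x

-- The effect of replacing 'a' by 'A', per character.
def pvRepl (c : Char) : Char := if c = 'a' then 'A' else c

-- Single-character replace is a map of pvRepl.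
theorem pv_go_single (fuel : Nat) : ∀ (l acc : List Char), l.length ≤ fuel →
    PySem.Chars.replace.go ['a'] ['A'] fuel l acc = acc.reverse ++ l.map pvRepl := by
  induction fuel with
  | zero => intro l acc h; simp at h; subst h; simp [PySem.Chars.replace.go]
  | succ n ih =>
    intro l acc h
    cases l with
    | nil => simp [PySem.Chars.replace.go]
    | cons c t =>
      simp only [PySem.Chars.replace.go]
      by_cases hc : c = 'a'
      · subst hc
        rw [if_pos (by simp [List.isPrefixOf])]
        rw [ih _ _ (by simpa using h)]
        simp [pvRepl]
      · rw [if_neg (by simp [List.isPrefixOf]; exact fun h' => hc h'.symm)]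
        rw [ih _ _ (by simpa using h)]
        simp [pvRepl, hc]

theorem pv_replace_single (l : List Char) :
    PySem.Chars.replace l ['a'] ['A'] = l.map pvRepl := by
  unfold PySem.Chars.replace
  rw [if_neg (by decide)]
  simpa using pv_go_single l.length l [] le_rfl

-- Lowercasing then replacing agrees with A's branch, per character.
theorem pv_pointwise (c : Char) : pvRepl (PySem.Chars.lowerChar c) = pvStepA c := by
  unfold pvRepl pvStepA PySem.Chars.lowerChar
  by_cases hU : PySem.Chars.isupper c = true
  · have hr : 'A' ≤ c ∧ c ≤ 'Z' := by
      unfold PySem.Chars.isupper at hU; simpa using hU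
    have hz : c.toNat ≤ 90 := hr.2
    have hvalid : (c.toNat + 32).isValidChar := Or.inl (by omega)
    have h3 : (Char.ofNat (c.toNat + 32)).toNat = c.toNat + 32 := by
      simp only [Char.ofNat, dif_pos hvalid]; rfl
    by_cases hA : c = 'A'
    · subst hA; decide
    · have hne : Char.ofNat (c.toNat + 32) ≠ 'a' := by
        intro h
        have h2 : (Char.ofNat (c.toNat + 32)).toNat = 97 := by rw [h]; rfl
        have h65 : c.toNat = 65 := by omega
        exact hA (Char.ext_iff.mpr (show c.val = 'A'.val from by
          apply UInt32.toNat_inj.mp; exact h65))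
      have hca : c ≠ 'a' := by
        intro h; subst h; exact absurd hr.2 (by decide)
      simp [hU, hne, hA, hca]
  · have hb : PySem.Chars.isupper c = false := by simpa using hU
    have hca' : c ≠ 'A' := by rintro rfl; exact hU (by decide)
    by_cases hca : c = 'a'
    · subst hca; decide
    · simp [hb, hca, hca']

-- A's fold is a map of pvStepA.
theorem pv_solution_eq_map (s : String) :
    solution s = String.ofList (s.toList.map pvStepA) := by
  unfold solution
  congr 1
  have hstep : (fun (answer : List Char) (x : Char) =>
      if x = 'a' ∨ x = 'A' then answer ++ ['A']
      else if PySem.Chars.isupper x then answer ++ [PySem.Chars.lowerChar x]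
      else answer ++ [x]) = fun answer x => answer ++ [pvStepA x] := by
    funext answer x; unfold pvStepA; split_ifs <;> rfl
  rw [hstep]
  simpa using PySem.List.foldl_append_singleton_eq_map pvStepA s.toList []

-- ===== VERDICT (by name: the statement is the Claim_ definition above) =====
theorem solution_spec : Claim_equal_solution := by
  intro s _
  show solution s = solution_alt s
  rw [pv_solution_eq_map]
  apply String.toList_inj.mp
  unfold solution_alt
  rw [PySem.Str.toList_replace, PySem.Str.toList_lower]
  show _ = PySem.Chars.replace (PySem.Chars.lower s.toList) "a".toList "A".toList
  have : "a".toList = ['a'] := rfl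
  rw [this, show "A".toList = ['A'] from rfl, pv_replace_single]
  unfold PySem.Chars.lower
  simp [List.map_map, Function.comp, pv_pointwise]
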